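-- pv_equiv track=rewrite | github.com/reymom/Minority-Game | mygame_functions.py | integer_state
-- ===== SOURCE A (Python) =====
-- def integer_state(history):
--     """
--     Maps a list of m combinations of 1s and -1s to a unique integer
--     INPUT | history: a list of the last m outputs of the game
--     OUTPUT| state:  unique integer
--     """
--     state = 0
--     p = len(history)-1
--     for i in history:
--         if i == 1:
--             state += 2**p
--         p -= 1
--     return state
-- ===== SOURCE B (Python) =====
-- def integer_state(history):
--     s = ''.join('1' if i == 1 else '0' for i in history)
--     return int(s or '0', 2)
-- ===== Notes on version B (the rewrite author's own statement) =====
-- stated objective: idiomatic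
-- what changed: B builds the binary string of the history ('1' where the element equals 1, else '0') and parses it with int(s, 2), instead of A's manual accumulation of 2**p with a decrementing exponent counter.
import Mathlib
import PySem

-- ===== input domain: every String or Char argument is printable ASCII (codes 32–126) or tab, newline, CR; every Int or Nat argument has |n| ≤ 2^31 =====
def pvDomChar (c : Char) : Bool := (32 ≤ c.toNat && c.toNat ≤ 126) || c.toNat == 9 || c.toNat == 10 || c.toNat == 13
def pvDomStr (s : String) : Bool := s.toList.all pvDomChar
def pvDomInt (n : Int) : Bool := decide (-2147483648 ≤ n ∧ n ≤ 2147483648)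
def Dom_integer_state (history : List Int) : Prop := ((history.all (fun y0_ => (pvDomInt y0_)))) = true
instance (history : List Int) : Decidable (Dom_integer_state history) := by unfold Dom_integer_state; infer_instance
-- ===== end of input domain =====

-- B rewrites A's manual power-accumulation as the idiomatic "build the binary string and parse it with int(s, 2)"; same cost, same value.


-- ===== PORT A =====
-- Literal port of A: fold carrying (state, p), p starts at len-1 and decrements.
-- 2**p: p ≥ 0 whenever the i == 1 branch fires, so 2 ^ sp.2.toNat is exact there.
def integer_state (history : List Int) : Int :=
  (history.foldl
    (fun (sp : Int × Int) i =>
      ((if i = 1 then sp.1 + 2 ^ sp.2.toNat else sp.1), sp.2 - 1))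
    (0, (history.length : Int) - 1)).1

-- ===== PORT B =====
-- Port of B: map each element to a bit character, then int(s, 2) ported by hand
-- as the standard left-to-right binary parse (exact: s contains only '0'/'1';
-- the empty string case of `int(s or '0', 2)` is the parse's base value 0).
def integer_state_alt (history : List Int) : Int :=
  let s : List Char := history.map (fun i => if i = 1 then '1' else '0')
  s.foldl (fun acc c => 2 * acc + (if c = '1' then 1 else 0)) 0

-- ===== PRECONDITION & SPEC =====
def Spec_integer_state (history : List Int) (out : Int) : Prop := out = integer_state_alt history
instance (history : List Int) (out : Int) : Decidable (Spec_integer_state history out) := by unfold Spec_integer_state; infer_instance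

-- ===== CLAIM (what is proved, stated in full; the proofs are below) =====
def Claim_equal_integer_state : Prop := ∀ (history : List Int), Dom_integer_state history → Spec_integer_state history (integer_state history)

-- ===== LEMMAS AND PROOFS =====

-- ===== VERDICT (by name: the statement is the Claim_ definition above) =====
-- binary-parse shift: starting accumulator contributes acc * 2^len
lemma parse_shift (l : List Char) : ∀ (acc : Int),
    l.foldl (fun acc c => 2 * acc + (if c = '1' then 1 else 0)) acc
      = acc * 2 ^ l.length + l.foldl (fun acc c => 2 * acc + (if c = '1' then 1 else 0)) 0 := by
  induction l with
  | nil => intro acc; simp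
  | cons x xs ih =>
      intro acc
      simp only [List.foldl_cons, List.length_cons]
      rw [ih (2 * acc + _), ih (2 * 0 + _)]
      ring

-- A's loop, started at p = len - 1 with state s, adds B's value to s
lemma loopA_eq (l : List Int) : ∀ (s : Int),
    (l.foldl
      (fun (sp : Int × Int) i =>
        ((if i = 1 then sp.1 + 2 ^ sp.2.toNat else sp.1), sp.2 - 1))
      (s, (l.length : Int) - 1)).1
      = s + (l.map (fun i => if i = 1 then '1' else '0')).foldl
              (fun acc c => 2 * acc + (if c = '1' then 1 else 0)) 0 := by
  induction l with
  | nil => intro s; simp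
  | cons x xs ih =>
      intro s
      simp only [List.foldl_cons, List.map_cons, List.length_cons]
      have hp : ((xs.length : Int) + 1 - 1) = (xs.length : Int) := by ring
      have hp2 : ((xs.length : Int) + 1 - 1 - 1) = (xs.length : Int) - 1 := by ring
      rw [show ((xs.length + 1 : Nat) : Int) - 1 = (xs.length : Int) + 1 - 1 by push_cast; ring]
      rw [hp2, ih]
      have ht : ((xs.length : Int) + 1 - 1).toNat = xs.length := by omega
      rw [hp] at ht ⊢
      rw [ht]
      conv_rhs => rw [parse_shift]
      by_cases hx : x = 1 <;> simp [hx] <;> ring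

theorem integer_state_spec : Claim_equal_integer_state := by
  intro history _
  unfold Spec_integer_state integer_state integer_state_alt
  simpa using loopA_eq history 0
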